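-- pv_equiv track=rewrite | github.com/BertRules/Global_reconstruction_of_language_models_with_linguistic_rules | rule/aspectrulemine.py | __get_term_pos_type_ner
-- ===== SOURCE A (Python) =====
-- def __get_term_pos_type_ner(term_pos_tags):
--     for t in term_pos_tags:
--         if t  == 'NER_O':
--             return 'NER_O'
--     for t in term_pos_tags:
--         if t != 'NER_O':
--             return t
--     return None
-- ===== SOURCE B (Python) =====
-- def __get_term_pos_type_ner(term_pos_tags):
--     first = None
--     seen = False
--     for t in term_pos_tags:
--         if t == 'NER_O':
--             return 'NER_O'
--         if not seen:
--             first = t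
--             seen = True
--     return first
-- ===== Notes on version B (the rewrite author's own statement) =====
-- stated objective: alternative
-- what changed: Fuses A's two sequential scans into a single pass that returns 'NER_O' immediately on a match while capturing the first element in a seen-guarded variable, returned after the loop.
import Mathlib
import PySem

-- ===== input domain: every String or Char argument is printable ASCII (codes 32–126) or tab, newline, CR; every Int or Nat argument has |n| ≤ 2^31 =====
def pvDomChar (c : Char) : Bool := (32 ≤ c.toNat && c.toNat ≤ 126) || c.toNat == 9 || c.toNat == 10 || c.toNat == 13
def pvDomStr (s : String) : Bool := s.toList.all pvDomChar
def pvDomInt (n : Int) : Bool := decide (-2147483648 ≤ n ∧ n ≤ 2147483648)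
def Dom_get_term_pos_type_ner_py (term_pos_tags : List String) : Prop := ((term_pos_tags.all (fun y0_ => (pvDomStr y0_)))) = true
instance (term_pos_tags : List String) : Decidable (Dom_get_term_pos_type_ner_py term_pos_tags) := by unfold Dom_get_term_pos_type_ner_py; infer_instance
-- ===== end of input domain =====

-- B fuses A's two scans into one pass with a seen-flag capturing the first element (alternative decomposition, same cost).

-- ===== PORT A =====
-- first loop: return 'NER_O' on the first match
def pvALoop1 : List String → Option String
  | [] => none
  | t :: rest => if t = "NER_O" then some "NER_O" else pvALoop1 rest

-- second loop: return the first tag ≠ 'NER_O'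
def pvALoop2 : List String → Option String
  | [] => none
  | t :: rest => if t ≠ "NER_O" then some t else pvALoop2 rest

def get_term_pos_type_ner_py (term_pos_tags : List String) : Option String :=
  match pvALoop1 term_pos_tags with
  | some s => some s
  | none => pvALoop2 term_pos_tags

-- ===== PORT B =====
-- single pass: return 'NER_O' immediately; otherwise remember the first element via a seen flag
def pvBLoop (first : Option String) (seen : Bool) : List String → Option String
  | [] => first
  | t :: rest =>
      if t = "NER_O" then some "NER_O"
      else if !seen then pvBLoop (some t) true rest
      else pvBLoop first seen rest

def get_term_pos_type_ner_py_alt (term_pos_tags : List String) : Option String :=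
  pvBLoop none false term_pos_tags

-- ===== PRECONDITION & SPEC =====
def Spec_get_term_pos_type_ner_py (term_pos_tags : List String) (out : Option String) : Prop := out = get_term_pos_type_ner_py_alt term_pos_tags
instance (term_pos_tags : List String) (out : Option String) : Decidable (Spec_get_term_pos_type_ner_py term_pos_tags out) := by unfold Spec_get_term_pos_type_ner_py; infer_instance

-- ===== CLAIM (what is proved, stated in full; the proofs are below) =====
def Claim_equal_get_term_pos_type_ner_py : Prop := ∀ (term_pos_tags : List String), Dom_get_term_pos_type_ner_py term_pos_tags → Spec_get_term_pos_type_ner_py term_pos_tags (get_term_pos_type_ner_py term_pos_tags)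

-- ===== LEMMAS AND PROOFS =====
theorem pvALoop1_eq (l : List String) :
    pvALoop1 l = if "NER_O" ∈ l then some "NER_O" else none := by
  induction l with
  | nil => simp [pvALoop1]
  | cons t rest ih =>
      by_cases h : t = "NER_O"
      · simp [pvALoop1, h]
      · have h2 : ¬("NER_O" = t) := fun e => h e.symm
        simp [pvALoop1, h, h2, ih]

theorem pvALoop2_eq (l : List String) (h : "NER_O" ∉ l) :
    pvALoop2 l = l.head? := by
  cases l with
  | nil => rfl
  | cons t rest =>
      have ht : t ≠ "NER_O" := by intro e; exact h (by simp [e])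
      simp [pvALoop2, ht]

theorem pvBLoop_seen (first : Option String) (l : List String) :
    pvBLoop first true l = if "NER_O" ∈ l then some "NER_O" else first := by
  induction l generalizing first with
  | nil => simp [pvBLoop]
  | cons t rest ih =>
      by_cases h : t = "NER_O"
      · simp [pvBLoop, h]
      · have h2 : ¬("NER_O" = t) := fun e => h e.symm
        simp [pvBLoop, h, h2, ih]

theorem alt_eq (l : List String) :
    get_term_pos_type_ner_py_alt l = if "NER_O" ∈ l then some "NER_O" else l.head? := by
  cases l with
  | nil => simp [get_term_pos_type_ner_py_alt, pvBLoop]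
  | cons t rest =>
      by_cases h : t = "NER_O"
      · simp [get_term_pos_type_ner_py_alt, pvBLoop, h]
      · have h2 : ¬("NER_O" = t) := fun e => h e.symm
        simp [get_term_pos_type_ner_py_alt, pvBLoop, h, h2, pvBLoop_seen]

-- ===== VERDICT (by name: the statement is the Claim_ definition above) =====
theorem get_term_pos_type_ner_py_spec : Claim_equal_get_term_pos_type_ner_py := by
  intro l _
  unfold Spec_get_term_pos_type_ner_py get_term_pos_type_ner_py
  rw [alt_eq, pvALoop1_eq]
  by_cases h : "NER_O" ∈ l
  · simp [h]
  · simp [h, pvALoop2_eq l h]
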